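-- pv_equiv track=rewrite | github.com/paultpma/Cisco | script/fileParser.py | countExtensions
-- ===== SOURCE A (Python) =====
-- def countExtensions(fileNameList):
--     #Count the extensions using a dictionary
--     extensionCountList = {}
--
--     for fileName in fileNameList:
--         extension = fileName.rpartition(".")[2]
--         if (extensionCountList.get(extension)):
--             extensionCountList[extension] += 1
--         else:
--             extensionCountList[extension] = 1
--
--     return  extensionCountList
-- ===== SOURCE B (Python) =====
-- def countExtensions(fileNameList):
--     # Sort the extensions and count equal neighbours with one run-length scan,
--     # then emit the counts keyed by distinct extension in first-appearance order.
--     exts = [f.rpartition(".")[2] for f in fileNameList]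
--     counts = {}
--     prev = None
--     c = 0
--     for e in sorted(exts):
--         if c > 0 and e == prev:
--             c += 1
--         else:
--             if c > 0:
--                 counts[prev] = c
--             prev = e
--             c = 1
--     if c > 0:
--         counts[prev] = c
--     return {e: counts.get(e, 0) for e in dict.fromkeys(exts)}
-- ===== Notes on version B (the rewrite author's own statement) =====
-- stated objective: alternative
-- what changed: Replaces the incremental get/increment hash accumulation with a sort of the extension list followed by a run-length scan over equal neighbours, the result re-keyed by the distinct extensions in first-appearance order.
import Mathlib
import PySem

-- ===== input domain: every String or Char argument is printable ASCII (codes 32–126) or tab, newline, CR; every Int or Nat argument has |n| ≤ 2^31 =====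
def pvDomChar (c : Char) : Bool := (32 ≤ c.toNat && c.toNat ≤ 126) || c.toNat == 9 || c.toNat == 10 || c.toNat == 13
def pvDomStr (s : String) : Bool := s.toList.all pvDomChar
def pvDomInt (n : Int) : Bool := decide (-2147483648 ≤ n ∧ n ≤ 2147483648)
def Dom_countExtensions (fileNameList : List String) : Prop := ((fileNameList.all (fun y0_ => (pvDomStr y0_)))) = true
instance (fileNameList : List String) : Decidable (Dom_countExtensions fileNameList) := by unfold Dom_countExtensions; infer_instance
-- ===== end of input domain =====

-- B sorts the extension list and counts equal neighbours in one run-length scan (re-keyed by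
-- first appearance) instead of A's incremental get/increment hash accumulation.

-- fileName.rpartition(".")[2]: the part after the LAST '.', or the whole string if there is
-- no '.'. Hand port, exact; both Pythons use this same expression.
def extOf (s : String) : String :=
  let cs := s.toList
  if cs.contains '.' then String.ofList ((cs.reverse.takeWhile (fun c => c ≠ '.')).reverse)
  else s

-- ===== PORT A =====
-- A's loop body: 'if extensionCountList.get(extension): … += 1 else: … = 1'
-- (get(e) is truthy exactly when e is present with a nonzero value).
def stepA (d : PySem.Dict String Int) (extension : String) : PySem.Dict String Int :=
  match d.get? extension with
  | some v => if v ≠ 0 then d.insert extension (v + 1) else d.insert extension 1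
  | none => d.insert extension 1

def countExtensions (fileNameList : List String) : List (String × Int) :=
  (fileNameList.foldl (fun d fileName => stepA d (extOf fileName))
    (PySem.Dict.empty : PySem.Dict String Int)).items

-- ===== PORT B =====
-- 'if c > 0: counts[prev] = c' — closes the open run (prev is a string whenever c > 0).
def closeRun (st : PySem.Dict String Int × Option String × Int) : PySem.Dict String Int :=
  match st with
  | (counts, prev, c) =>
    if 0 < c then (match prev with | some p => counts.insert p c | none => counts) else counts

-- B's loop body over the sorted extension list; state = (counts, prev, c).
def stepB (st : PySem.Dict String Int × Option String × Int) (e : String) :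
    PySem.Dict String Int × Option String × Int :=
  match st with
  | (counts, prev, c) =>
    if 0 < c ∧ some e = prev then (counts, prev, c + 1)
    else (closeRun (counts, prev, c), some e, 1)

-- sorted(exts): Python's str order is code-point lexicographic = the lexicographic order on
-- toList (instances spelled out so the order lemmas apply verbatim).
def pySortStr (xs : List String) : List String :=
  @PySem.List.sorted String (List Char) List.instLinearOrder.toLT LinearOrder.toDecidableLT
    xs (fun x => x.toList) false

def countExtensions_alt (fileNameList : List String) : List (String × Int) :=
  let exts := fileNameList.map (fun f => extOf f)
  let counts := closeRun ((pySortStr exts).foldl stepB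
      ((PySem.Dict.empty : PySem.Dict String Int), none, 0))
  (PySem.List.dedup exts).map (fun e => (e, counts.getD e 0))

-- ===== PRECONDITION & SPEC =====
def Spec_countExtensions (fileNameList : List String) (out : List (String × Int)) : Prop := out = countExtensions_alt fileNameList
instance (fileNameList : List String) (out : List (String × Int)) : Decidable (Spec_countExtensions fileNameList out) := by unfold Spec_countExtensions; infer_instance

-- ===== CLAIM (what is proved, stated in full; the proofs are below) =====
def Claim_equal_countExtensions : Prop := ∀ (fileNameList : List String), Dom_countExtensions fileNameList → Spec_countExtensions fileNameList (countExtensions fileNameList)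

-- ===== LEMMAS AND PROOFS =====

-- A side: on a dictionary whose stored values are all positive, A's loop body is exactly
-- the Counter step 'd[e] = d.get(e, 0) + 1'.
theorem stepA_eq_counter_step (d : PySem.Dict String Int)
    (hpos : ∀ k v, d.get? k = some v → 0 < v) (e : String) :
    stepA d e = d.insert e (d.getD e 0 + 1) := by
  unfold stepA
  cases h : d.get? e with
  | none => simp [PySem.Dict.getD_of_get?_eq_none d 0 h]
  | some v =>
    have hv := hpos e v h
    simp [PySem.Dict.getD_of_get?_eq_some d 0 h]
    omega

theorem counter_step_pos (d : PySem.Dict String Int)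
    (hpos : ∀ k v, d.get? k = some v → 0 < v) (e : String) :
    ∀ k v, (d.insert e (d.getD e 0 + 1)).get? k = some v → 0 < v := by
  intro k v h
  rw [PySem.Dict.get?_insert] at h
  split at h
  · cases h
    cases hg : d.get? e with
    | none => rw [PySem.Dict.getD_of_get?_eq_none d 0 hg]; omega
    | some w => have := hpos e w hg; rw [PySem.Dict.getD_of_get?_eq_some d 0 hg]; omega
  · exact hpos k v h

theorem foldA_eq_foldCounter (l : List String) :
    ∀ (d : PySem.Dict String Int), (∀ k v, d.get? k = some v → 0 < v) →
    l.foldl stepA d = l.foldl (fun d e => d.insert e (d.getD e 0 + 1)) d := by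
  induction l with
  | nil => intro d _; rfl
  | cons e t ih =>
    intro d hpos
    simp only [List.foldl_cons, stepA_eq_counter_step d hpos e]
    exact ih _ (counter_step_pos d hpos e)

-- B side: reducing the loop body and the run closer.
theorem stepB_continue (counts : PySem.Dict String Int) (p : String) (c : Int) (hc : 0 < c) :
    stepB (counts, some p, c) p = (counts, some p, c + 1) := by
  simp [stepB, hc]

theorem stepB_new (counts : PySem.Dict String Int) (prev : Option String) (c : Int) (x : String)
    (h : ¬ (0 < c ∧ some x = prev)) :
    stepB (counts, prev, c) x = (closeRun (counts, prev, c), some x, 1) := by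
  simp only [stepB]
  rw [if_neg h]

theorem closeRun_pos (counts : PySem.Dict String Int) (p : String) (c : Int) (hc : 0 < c) :
    closeRun (counts, some p, c) = counts.insert p c := by
  simp [closeRun, hc]

-- The run-length scan over a sorted tail, starting inside an open run (p, c): every final
-- lookup is either the finished count of a key of the tail, c + count for the open key p,
-- or an untouched earlier entry.
theorem runLemma (s : List String) :
    ∀ (counts : PySem.Dict String Int) (p : String) (c : Int), 0 < c →
    s.Pairwise (fun a b => a.toList ≤ b.toList) → (∀ x ∈ s, p.toList ≤ x.toList) →
    ∀ e, (closeRun (s.foldl stepB (counts, some p, c))).getD e 0 =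
      if e = p then c + s.count p
      else if e ∈ s then (s.count e : Int)
      else counts.getD e 0 := by
  induction s with
  | nil =>
    intro counts p c hc _ _ e
    simp only [List.foldl_nil, closeRun_pos counts p c hc]
    rw [PySem.Dict.getD_insert]
    simp
  | cons x t ih =>
    intro counts p c hc hpair hge e
    have hx := hge x (by simp)
    have hgt : ∀ y ∈ t, x.toList ≤ y.toList := (List.pairwise_cons.mp hpair).1
    have htp : t.Pairwise (fun a b => a.toList ≤ b.toList) := (List.pairwise_cons.mp hpair).2
    by_cases hxp : x = p
    · subst hxp
      rw [List.foldl_cons, stepB_continue counts x c hc,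
        ih counts x (c + 1) (by omega) htp hgt e]
      by_cases hex : e = x
      · subst hex; simp; omega
      · have hxe : ¬ x = e := fun h => hex h.symm
        by_cases het : e ∈ t
        · simp [hex, hxe, het]
        · simp [hex, het]
    · have hcond : ¬ (0 < c ∧ some x = some p) := by
        intro h
        exact hxp (Option.some_inj.mp h.2)
      rw [List.foldl_cons, stepB_new counts (some p) c x hcond, closeRun_pos counts p c hc,
        ih (counts.insert p c) x 1 (by omega) htp hgt e]
      -- p occurs nowhere in x :: t: its key is strictly below every key there
      have hplt : p.toList < x.toList :=
        lt_of_le_of_ne hx (fun h => hxp (String.toList_inj.mp h.symm))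
      have hpt : p ∉ t := fun h => absurd hplt (not_lt.mpr (hgt p h))
      by_cases hep : e = p
      · subst hep
        rw [if_neg (fun h : e = x => hxp h.symm), if_neg hpt, if_pos rfl,
          PySem.Dict.getD_insert, if_pos rfl]
        simp [hxp, List.count_eq_zero.mpr hpt]
      · by_cases hex : e = x
        · subst hex
          rw [if_pos rfl, if_neg hep, if_pos (List.mem_cons_self), List.count_cons_self]
          push_cast; ring
        · by_cases het : e ∈ t
          · have hxe : ¬ x = e := fun h => hex h.symm
            simp [het, hep, hex, hxe]
          · rw [if_neg hex, if_neg het, if_neg hep,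
              if_neg (by simp [hex, het] : ¬ e ∈ x :: t),
              PySem.Dict.getD_insert_of_ne counts c 0 hep]

-- Every lookup in B's finished counts dictionary is the plain occurrence count.
theorem counts_getD (exts : List String) (e : String) :
    (closeRun ((pySortStr exts).foldl stepB
        ((PySem.Dict.empty : PySem.Dict String Int), none, 0))).getD e 0
      = (exts.count e : Int) := by
  cases h : pySortStr exts with
  | nil =>
    have : exts = [] := by
      unfold pySortStr at h
      exact (@PySem.List.sorted_eq_nil_iff String (List Char) List.instLinearOrder.toLT
        LinearOrder.toDecidableLT exts (fun x => x.toList) false).mp h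
    subst this
    simp [closeRun, PySem.Dict.getD_empty]
  | cons x t =>
    have hperm : (x :: t).Perm exts := by
      rw [← h]; unfold pySortStr
      exact @PySem.List.sorted_perm String (List Char) List.instLinearOrder.toLT
        LinearOrder.toDecidableLT exts (fun x => x.toList) false
    have hpair : (x :: t).Pairwise (fun a b => a.toList ≤ b.toList) := by
      rw [← h]; unfold pySortStr
      exact PySem.List.sorted_pairwise exts (fun y => y.toList)
    rw [List.foldl_cons, stepB_new _ none 0 x (by simp),
      (by simp [closeRun] : closeRun ((PySem.Dict.empty : PySem.Dict String Int), none, 0) = PySem.Dict.empty),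
      runLemma t PySem.Dict.empty x 1 (by omega) (List.pairwise_cons.mp hpair).2
        (List.pairwise_cons.mp hpair).1 e,
      ← hperm.count_eq e]
    by_cases hex : e = x
    · subst hex
      rw [if_pos rfl, List.count_cons_self]
      push_cast; ring
    · by_cases het : e ∈ t
      · have hxe : ¬ x = e := fun h => hex h.symm
        simp [hex, hxe, het]
      · have hxe : ¬ x = e := fun h => hex h.symm
        rw [if_neg hex, if_neg het, PySem.Dict.getD_empty]
        simp [hxe, List.count_eq_zero.mpr het]

-- ===== VERDICT (by name: the statement is the Claim_ definition above) =====
theorem countExtensions_spec : Claim_equal_countExtensions := by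
  intro l _
  show countExtensions l = countExtensions_alt l
  unfold countExtensions countExtensions_alt
  rw [← List.foldl_map (f := fun f => extOf f) (g := stepA),
    foldA_eq_foldCounter _ _ (by simp [PySem.Dict.get?_empty]),
    PySem.Dict.foldl_insert_getD_add_one_eq_counter, PySem.Dict.items_counter]
  simp only [PySem.List.dedup_eq_ofList]
  exact List.map_congr_left (fun e _ => by rw [counts_getD])
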